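-- pv_equiv track=rewrite | github.com/cirosantilli/project-euler-solutions | solvers/864.py | negative_pell_fundamental_bounded
-- ===== SOURCE A (Python) =====
-- import math
--
-- def negative_pell_fundamental_bounded(D: int, x_limit: int):
--     """Return minimal (x,y) solving x^2 - D*y^2 = -1, or None if no useful solution.
--
--     Uses the continued fraction of sqrt(D). The negative Pell has a solution iff
--     the CF period length is odd.
--
--     Optimization: we only need solutions with x <= x_limit. Convergent numerators
--     p_i grow strictly, so once p_i > x_limit, later convergents cannot help and
--     we can stop early.
--     """
--     a0 = int(math.isqrt(D))
--     if a0 * a0 == D: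
--         return None
--
--     m = 0
--     d = 1
--     a = a0
--
--     # convergents: p_{-1}=1, p_0=a0; q_{-1}=0, q_0=1
--     p_prev, p = 1, a0
--     q_prev, q = 0, 1
--
--     period = 0
--     while True:
--         m = d * a - m
--         d = (D - m * m) // d
--         a = (a0 + m) // d
--
--         p_prev, p = p, a * p + p_prev
--         q_prev, q = q, a * q + q_prev
--
--         period += 1
--         if p_prev > x_limit:
--             return None
--         if a == 2 * a0:
--             break
--
--     if period % 2 == 0:
--         return None
--
--     x, y = p_prev, q_prev
--     if x * x - D * y * y != -1:
--         return None
--     return (x, y)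
-- ===== SOURCE B (Python) =====
-- import math
--
-- def negative_pell_fundamental_bounded(D: int, x_limit: int):
--     """Two-pass version: collect the CF period terms of sqrt(D) first, then
--     fold the convergent recurrence over them, checking the x_limit once at
--     the end (convergent numerators grow monotonically)."""
--     a0 = math.isqrt(D)
--     if a0 * a0 == D:
--         return None
--
--     # pass 1: continued-fraction terms of sqrt(D) up to the end of the period
--     terms = []
--     m, d, a = 0, 1, a0
--     while True:
--         m = d * a - m
--         d = (D - m * m) // d
--         a = (a0 + m) // d
--         terms.append(a)
--         if a == 2 * a0:
--             break
--
--     if len(terms) % 2 == 0: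
--         return None  # negative Pell solvable iff the period is odd
--
--     # pass 2: fold the convergent recurrence over the collected terms
--     p_prev, p, q_prev, q = 1, a0, 0, 1
--     for t in terms:
--         p_prev, p = p, t * p + p_prev
--         q_prev, q = q, t * q + q_prev
--
--     x, y = p_prev, q_prev
--     if x > x_limit:
--         return None
--     if x * x - D * y * y != -1:
--         return None
--     return (x, y)
-- ===== Notes on version B (the rewrite author's own statement) =====
-- stated objective: alternative
-- what changed: A fuses CF-term generation, convergent updates and a per-iteration x_limit early-exit into one while loop; B is two passes: it first collects the CF period terms into a list (deciding solvability by the period's parity before touching convergents), then folds the convergent recurrence over the list and applies the x_limit guard once at the end, relying on monotone numerator growth.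
import Mathlib
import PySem

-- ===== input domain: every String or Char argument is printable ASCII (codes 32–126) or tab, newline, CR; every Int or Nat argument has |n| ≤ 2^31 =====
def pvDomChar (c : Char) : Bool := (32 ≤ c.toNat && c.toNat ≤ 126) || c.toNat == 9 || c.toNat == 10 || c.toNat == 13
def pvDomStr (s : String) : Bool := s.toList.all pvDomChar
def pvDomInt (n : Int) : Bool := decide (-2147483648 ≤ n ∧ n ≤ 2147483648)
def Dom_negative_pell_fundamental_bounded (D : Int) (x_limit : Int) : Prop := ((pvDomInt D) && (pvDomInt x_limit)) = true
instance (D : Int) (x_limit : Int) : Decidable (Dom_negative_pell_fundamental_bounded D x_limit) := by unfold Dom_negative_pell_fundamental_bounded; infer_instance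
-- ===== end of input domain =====

-- B restates A's fused CF loop as two passes (collect the CF period terms, then fold the
-- convergents over them with one final x_limit check); objective: alternative decomposition.
-- Both Python loops are `while True` with a data-dependent break; the ports drive them with the
-- same fuel pvFuel D, larger than the CF period of sqrt(D) for every D in Dom (the period is at
-- most the number of CF states (m,d), below (D+2)^2); on fuel exhaustion both ports return none.

-- ===== PORT A =====
def pvFuel (D : Int) : Nat := (D.toNat + 2) * (D.toNat + 2)

-- A's while-loop: state (m, d, a, p_prev, p, q_prev, q, period), transliterated step for step
def loopA (D a0 x_limit : Int) : Nat → Int → Int → Int → Int → Int → Int → Int → Nat → Option (Int × Int)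
  | 0, _, _, _, _, _, _, _, _ => none
  | n+1, m, d, a, pp, p, qp, q, k =>
    let m' := d * a - m
    let d' := PySem.Int.floordiv (D - m' * m') d
    let a' := PySem.Int.floordiv (a0 + m') d'
    let pp2 := p
    let p2 := a' * p + pp
    let qp2 := q
    let q2 := a' * q + qp
    let k2 := k + 1
    if pp2 > x_limit then none
    else if a' = 2 * a0 then
      -- break: post-loop code of A
      if k2 % 2 = 0 then none
      else if pp2 * pp2 - D * qp2 * qp2 ≠ -1 then none
      else some (pp2, qp2)
    else loopA D a0 x_limit n m' d' a' pp2 p2 qp2 q2 k2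

def negative_pell_fundamental_bounded (D : Int) (x_limit : Int) : Option (Int × Int) :=
  let a0 : Int := (Nat.sqrt D.toNat : Int)  -- math.isqrt(D); exact for D ≥ 0 (Pre_), raises for D < 0
  if a0 * a0 = D then none
  else loopA D a0 x_limit (pvFuel D) 0 1 a0 1 a0 0 1 0

-- ===== PORT B =====
-- pass 1 of B: collect the CF terms of sqrt(D) until a == 2*a0 (inclusive)
def cfTerms (D a0 : Int) : Nat → Int → Int → Int → Option (List Int)
  | 0, _, _, _ => none
  | n+1, m, d, a =>
    let m' := d * a - m
    let d' := PySem.Int.floordiv (D - m' * m') d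
    let a' := PySem.Int.floordiv (a0 + m') d'
    if a' = 2 * a0 then some [a']
    else match cfTerms D a0 n m' d' a' with
      | none => none
      | some ts => some (a' :: ts)

-- pass 2 of B: fold the convergent recurrence (p_prev,p,q_prev,q) over the terms
def convStep (st : Int × Int × Int × Int) (t : Int) : Int × Int × Int × Int :=
  (st.2.1, t * st.2.1 + st.1, st.2.2.2, t * st.2.2.2 + st.2.2.1)

def negative_pell_fundamental_bounded_alt (D : Int) (x_limit : Int) : Option (Int × Int) :=
  let a0 : Int := (Nat.sqrt D.toNat : Int)
  if a0 * a0 = D then none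
  else match cfTerms D a0 (pvFuel D) 0 1 a0 with
    | none => none
    | some ts =>
      if ts.length % 2 = 0 then none
      else
        let st := ts.foldl convStep (1, a0, 0, 1)
        if st.1 > x_limit then none
        else if st.1 * st.1 - D * st.2.2.1 * st.2.2.1 ≠ -1 then none
        else some (st.1, st.2.2.1)

-- ===== PRECONDITION & SPEC =====
-- Pre_ excludes D < 0, on which math.isqrt (hence A) raises ValueError.
def Pre_negative_pell_fundamental_bounded (D : Int) (x_limit : Int) : Prop := 0 ≤ D
instance (D : Int) (x_limit : Int) : Decidable (Pre_negative_pell_fundamental_bounded D x_limit) := by unfold Pre_negative_pell_fundamental_bounded; infer_instance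
def pvWitness_negative_pell_fundamental_bounded : Int × Int := (13, 1000)

def Spec_negative_pell_fundamental_bounded (D : Int) (x_limit : Int) (out : Option (Int × Int)) : Prop := out = negative_pell_fundamental_bounded_alt D x_limit
instance (D : Int) (x_limit : Int) (out : Option (Int × Int)) : Decidable (Spec_negative_pell_fundamental_bounded D x_limit out) := by unfold Spec_negative_pell_fundamental_bounded; infer_instance

-- ===== CLAIM (what is proved, stated in full; the proofs are below) =====
def Claim_equal_negative_pell_fundamental_bounded : Prop := ∀ (D : Int) (x_limit : Int), Dom_negative_pell_fundamental_bounded D x_limit → Pre_negative_pell_fundamental_bounded D x_limit → Spec_negative_pell_fundamental_bounded D x_limit (negative_pell_fundamental_bounded D x_limit)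

-- ===== LEMMAS AND PROOFS =====


-- invariant: (m + sqrt D)/d is a reduced quadratic surd, stated in integers
def PellInv (D a0 m d : Int) : Prop :=
  1 ≤ d ∧ 0 ≤ m ∧ m ≤ a0 ∧ d ∣ (D - m * m) ∧ a0 < m + d ∧ d ≤ a0 + m

-- invariant for the full loop state (covers the special initial state (0,1,a0))
def PellState (D a0 m d a : Int) : Prop :=
  (m = 0 ∧ d = 1 ∧ a = a0) ∨ (PellInv D a0 m d ∧ a = PySem.Int.floordiv (a0 + m) d)

theorem pell_step (D a0 : Int) (hsq : a0 * a0 < D) (hub : D ≤ a0 * a0 + 2 * a0)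
    (ha0 : 1 ≤ a0) (m d a : Int) (hS : PellState D a0 m d a) :
    PellState D a0 (d * a - m) (PySem.Int.floordiv (D - (d * a - m) * (d * a - m)) d)
      (PySem.Int.floordiv (a0 + (d * a - m)) (PySem.Int.floordiv (D - (d * a - m) * (d * a - m)) d)) ∧
    1 ≤ PySem.Int.floordiv (a0 + (d * a - m)) (PySem.Int.floordiv (D - (d * a - m) * (d * a - m)) d) := by
  rcases hS with ⟨hm, hd, ha⟩ | ⟨⟨hd1, hm0, hma, hdvd, hlt, hle⟩, ha⟩
  · subst hm; subst hd; rw [ha]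
    have e1 : (1 : Int) * a0 - 0 = a0 := by ring
    rw [e1]
    have hd' : PySem.Int.floordiv (D - a0 * a0) 1 = D - a0 * a0 := by
      rw [PySem.Int.floordiv_eq_ediv_of_pos one_pos, Int.ediv_one]
    rw [hd']
    refine ⟨Or.inr ⟨⟨by linarith, by linarith, le_refl _, dvd_refl _, by linarith, by linarith⟩, rfl⟩, ?_⟩
    exact (PySem.Int.le_floordiv_iff_mul_le (by linarith)).mpr (by linarith)
  · have hdpos : (0 : Int) < d := by linarith
    obtain ⟨hlo, hhi⟩ := (PySem.Int.floordiv_eq_iff_of_pos hdpos).mp ha.symm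
    have hlo' : d * a ≤ a0 + m := by nlinarith
    have hhi' : a0 + m < d * a + d := by nlinarith
    have ha1 : 1 ≤ a := by nlinarith
    set m' := d * a - m with hm'
    have hm'le : m' ≤ a0 := by simp only [hm']; linarith
    have hm'gt : a0 - d < m' := by simp only [hm']; linarith
    have hm'1 : 1 ≤ m' := by
      by_cases h : d ≤ a0
      · omega
      · have h2a : a0 < d := by omega
        have ha2 : a < 2 := by nlinarith
        have haa : a = 1 := by omega
        simp only [hm', haa]; linarith
    have hdvd' : d ∣ D - m' * m' := by
      have h1 : D - m' * m' = (D - m * m) - d * (a * (m' - m)) := by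
        simp only [hm']; ring
      rw [h1]
      exact dvd_sub hdvd ⟨a * (m' - m), rfl⟩
    obtain ⟨c, hc⟩ := hdvd'
    have hd'c : PySem.Int.floordiv (D - m' * m') d = c := by
      rw [hc, PySem.Int.floordiv_eq_ediv_of_pos hdpos,
        Int.mul_ediv_cancel_left _ (by omega)]
    have hm'sq : m' * m' < D := by nlinarith
    have hc1 : 1 ≤ c := by nlinarith
    have hdle' : d ≤ a0 + m' := by nlinarith
    have hlt' : a0 < m' + c := by
      by_contra h
      push Not at h
      have h2 : d * c ≤ (a0 + m') * (a0 - m') :=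
        mul_le_mul hdle' (by omega) (by omega) (by linarith)
      nlinarith
    have hclt : c < d + 2 * m' := by
      have h1 : (a0 + 1) * (a0 + 1) ≤ (m' + d) * (m' + d) :=
        mul_le_mul (by omega) (by omega) (by linarith) (by linarith)
      by_contra h
      push Not at h
      have h2 : d * (d + 2 * m') ≤ d * c :=
        mul_le_mul_of_nonneg_left h (by omega)
      nlinarith
    have hcle : c ≤ a0 + m' := by
      by_cases h : c ≤ m'
      · linarith
      · have h2c : m' < c := by omega
        have h1 : c * (c - 2 * m') < c * d :=
          mul_lt_mul_of_pos_left (by linarith) (by linarith)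
        have ht2 : (c - m') * (c - m') < D := by
          linarith [h1, mul_comm c d, hc,
            (by ring : (c - m') * (c - m') = c * (c - 2 * m') + m' * m')]
        have h3 : c - m' ≤ a0 := by
          by_contra hcon
          push Not at hcon
          have h4 : (a0 + 1) * (a0 + 1) ≤ (c - m') * (c - m') :=
            mul_le_mul (by omega) (by omega) (by linarith) (by omega)
          linarith [h4, ht2, hub,
            (by ring : (a0 + 1) * (a0 + 1) = a0 * a0 + 2 * a0 + 1)]
        linarith
    rw [hd'c]
    refine ⟨Or.inr ⟨⟨hc1, by omega, hm'le, ⟨d, by rw [hc]; ring⟩, hlt', hcle⟩, rfl⟩, ?_⟩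
    exact (PySem.Int.le_floordiv_iff_mul_le (by omega)).mpr (by linarith)

theorem cfTerms_pos (D a0 : Int) (hsq : a0 * a0 < D) (hub : D ≤ a0 * a0 + 2 * a0)
    (ha0 : 1 ≤ a0) :
    ∀ (n : Nat) (m d a : Int), PellState D a0 m d a →
      ∀ ts, cfTerms D a0 n m d a = some ts → ∀ t ∈ ts, 1 ≤ t := by
  intro n
  induction n with
  | zero => intro m d a _ ts h; simp [cfTerms] at h
  | succ n ih =>
    intro m d a hS ts h
    obtain ⟨hS', ha'1⟩ := pell_step D a0 hsq hub ha0 m d a hS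
    simp only [cfTerms] at h
    split at h
    · cases h
      intro t ht
      simp only [List.mem_singleton] at ht
      subst ht
      exact ha'1
    · split at h
      · cases h
      · rename_i rest hrest
        cases h
        intro t ht
        rcases List.mem_cons.mp ht with h | h
        · subst h; exact ha'1
        · exact ih _ _ _ hS' rest hrest t h

theorem foldConv_mono :
    ∀ (ts : List Int), (∀ t ∈ ts, 1 ≤ t) →
      ∀ st : Int × Int × Int × Int, 1 ≤ st.1 → st.1 ≤ st.2.1 →
        st.1 ≤ (ts.foldl convStep st).1 ∧ 1 ≤ (ts.foldl convStep st).1 := by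
  intro ts
  induction ts with
  | nil => intro _ st h1 h2; simp only [List.foldl]; exact ⟨le_refl _, h1⟩
  | cons t ts ih =>
    intro hts st h1 h2
    have ht : 1 ≤ t := hts t (by simp)
    have hts' : ∀ u ∈ ts, 1 ≤ u := fun u hu => hts u (by simp [hu])
    have h1' : 1 ≤ (convStep st t).1 := by simp only [convStep]; linarith
    have h2' : (convStep st t).1 ≤ (convStep st t).2.1 := by
      simp only [convStep]; nlinarith
    obtain ⟨ha, hb⟩ := ih hts' (convStep st t) h1' h2'
    refine ⟨?_, ?_⟩
    · calc st.1 ≤ st.2.1 := h2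
        _ = (convStep st t).1 := rfl
        _ ≤ ((t :: ts).foldl convStep st).1 := by simpa using ha
    · simpa using hb

theorem loopA_eq_two_pass (D a0 x_limit : Int) (hsq : a0 * a0 < D)
    (hub : D ≤ a0 * a0 + 2 * a0) (ha0 : 1 ≤ a0) :
    ∀ (n : Nat) (m d a pp p qp q : Int) (k : Nat), PellState D a0 m d a →
      1 ≤ pp → pp ≤ p →
      loopA D a0 x_limit n m d a pp p qp q k =
        (match cfTerms D a0 n m d a with
         | none => none
         | some ts =>
           if (k + ts.length) % 2 = 0 then none
           else
             let st := ts.foldl convStep (pp, p, qp, q)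
             if st.1 > x_limit then none
             else if st.1 * st.1 - D * st.2.2.1 * st.2.2.1 ≠ -1 then none
             else some (st.1, st.2.2.1)) := by
  intro n
  induction n with
  | zero =>
    intro m d a pp p qp q k _ _ _
    simp [loopA, cfTerms]
  | succ n ih =>
    intro m d a pp p qp q k hS h1 h2
    obtain ⟨hS', ha'1⟩ := pell_step D a0 hsq hub ha0 m d a hS
    simp only [loopA, cfTerms]
    set m' := d * a - m with hm'
    set d' := PySem.Int.floordiv (D - m' * m') d with hd'
    set a' := PySem.Int.floordiv (a0 + m') d' with ha'
    have hp1 : (1 : Int) ≤ p := le_trans h1 h2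
    have hp2 : p ≤ a' * p + pp := by
      nlinarith [mul_nonneg (sub_nonneg.mpr ha'1) (by linarith : (0:Int) ≤ p)]
    by_cases hbrk : a' = 2 * a0
    · rw [if_pos hbrk, if_pos hbrk]
      simp only [List.length_singleton, List.foldl, convStep]
      split_ifs <;> rfl
    · rw [if_neg hbrk, if_neg hbrk]
      by_cases hpx : p > x_limit
      · rw [if_pos hpx]
        cases hcf : cfTerms D a0 n m' d' a' with
        | none => rfl
        | some rest =>
          have hts : ∀ t ∈ rest, 1 ≤ t :=
            cfTerms_pos D a0 hsq hub ha0 n m' d' a' hS' rest hcf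
          have hmono := foldConv_mono rest hts (p, a' * p + pp, q, a' * q + qp)
            (by linarith) hp2
          have ecs : convStep (pp, p, qp, q) a' = (p, a' * p + pp, q, a' * q + qp) := rfl
          simp only [List.length_cons, List.foldl]
          rw [ecs]
          split_ifs with hpar hx
          · rfl
          · rfl
          all_goals
            exfalso
            have h5 : p ≤ (rest.foldl convStep (p, a' * p + pp, q, a' * q + qp)).1 :=
              hmono.1
            omega
      · rw [if_neg hpx]
        rw [ih m' d' a' p (a' * p + pp) q (a' * q + qp) (k + 1) hS' hp1 hp2]
        cases hcf : cfTerms D a0 n m' d' a' with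
        | none => rfl
        | some rest =>
          have ecs : convStep (pp, p, qp, q) a' = (p, a' * p + pp, q, a' * q + qp) := rfl
          simp only [List.length_cons, List.foldl]
          rw [ecs]
          have e : k + 1 + rest.length = k + (rest.length + 1) := by omega
          rw [e]

-- ===== VERDICT (by name: the statement is the Claim_ definition above) =====
theorem negative_pell_fundamental_bounded_spec : Claim_equal_negative_pell_fundamental_bounded := by
  unfold Claim_equal_negative_pell_fundamental_bounded
  intro D x_limit _ hPre
  unfold Spec_negative_pell_fundamental_bounded
  have hPre' : (0 : Int) ≤ D := hPre
  simp only [negative_pell_fundamental_bounded, negative_pell_fundamental_bounded_alt]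
  by_cases hsq0 : ((Nat.sqrt D.toNat : Nat) : Int) * ((Nat.sqrt D.toNat : Nat) : Int) = D
  · rw [if_pos hsq0, if_pos hsq0]
  · rw [if_neg hsq0, if_neg hsq0]
    set a0 : Int := ((Nat.sqrt D.toNat : Nat) : Int) with ha0def
    have hle : a0 * a0 ≤ D := by
      have h := Nat.sqrt_le' D.toNat
      have h2 : ((Nat.sqrt D.toNat ^ 2 : Nat) : Int) ≤ ((D.toNat : Nat) : Int) := by
        exact_mod_cast h
      push_cast at h2
      rw [Int.toNat_of_nonneg hPre'] at h2
      nlinarith [h2]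
    have hlt : a0 * a0 < D := lt_of_le_of_ne hle hsq0
    have hub : D ≤ a0 * a0 + 2 * a0 := by
      have h := Nat.lt_succ_sqrt' D.toNat
      have h2 : ((D.toNat : Nat) : Int) < (((Nat.sqrt D.toNat).succ ^ 2 : Nat) : Int) := by
        exact_mod_cast h
      push_cast at h2
      rw [Int.toNat_of_nonneg hPre'] at h2
      nlinarith [h2]
    have ha01 : 1 ≤ a0 := by
      have h0 : 0 ≤ a0 := Int.natCast_nonneg _
      nlinarith
    rw [loopA_eq_two_pass D a0 x_limit hlt hub ha01 (pvFuel D) 0 1 a0 1 a0 0 1 0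
      (Or.inl ⟨rfl, rfl, rfl⟩) le_rfl ha01]
    cases hcf : cfTerms D a0 (pvFuel D) 0 1 a0 with
    | none => rfl
    | some ts => simp
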